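-- pv_equiv track=rewrite | github.com/zenniskayy2k4/CTF-Archive | Nullcon/Field trip/solve.py | sqr
-- ===== SOURCE A (Python) =====
-- DEG = 224
--
-- f = 26959946667150639794667015087019630673637144422540572481103610249993
--
-- def reduce_poly(a: int) -> int:
--     # fast shift-xor reduction
--     while a.bit_length() > DEG:
--         a ^= f << (a.bit_length() - (DEG + 1))
--     return a
--
-- def sqr(a: int) -> int:
--     # square by inserting zeros between bits
--     x, res, pos = a, 0, 0
--     while x:
--         if x & 1:
--             res |= (1 << (pos * 2))
--         x >>= 1
--         pos += 1
--     return reduce_poly(res)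
-- ===== SOURCE B (Python) =====
-- DEG = 224
--
-- f = 26959946667150639794667015087019630673637144422540572481103610249993
--
-- def reduce_poly(a: int) -> int:
--     # fast shift-xor reduction
--     while a.bit_length() > DEG:
--         a ^= f << (a.bit_length() - (DEG + 1))
--     return a
--
-- def sqr(a: int) -> int:
--     # inserting a zero between every bit = reading a's binary digits in base 4
--     return reduce_poly(int(bin(a)[2:], 4))
-- ===== Notes on version B (the rewrite author's own statement) =====
-- stated objective: simpler
-- what changed: The explicit per-bit while-loop that spreads bits (shift, test the low bit, set bit 2*pos) is replaced by a single radix-conversion expression int(bin(a)[2:], 4), since interleaving zeros between bits equals reading the binary digits as a base-4 numeral; reduce_poly is unchanged. Pre_ excludes negative a, where A's while-loop never terminates and B raises ValueError.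
import Mathlib
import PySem

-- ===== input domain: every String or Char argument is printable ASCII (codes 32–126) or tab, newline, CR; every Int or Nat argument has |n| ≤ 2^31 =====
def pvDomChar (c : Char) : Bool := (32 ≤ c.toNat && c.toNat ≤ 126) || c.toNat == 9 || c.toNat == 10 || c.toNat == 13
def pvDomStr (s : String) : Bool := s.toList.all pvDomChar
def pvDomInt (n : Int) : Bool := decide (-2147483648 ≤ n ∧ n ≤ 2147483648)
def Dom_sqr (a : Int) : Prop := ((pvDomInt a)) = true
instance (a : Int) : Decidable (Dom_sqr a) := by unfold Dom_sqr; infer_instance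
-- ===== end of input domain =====

-- B replaces A's per-bit spreading loop by reading a's binary digits as a base-4 number (simpler);
-- equality is about return values on nonnegative a (A never terminates on negative a, B raises ValueError there).

-- ===== PORT A =====

-- f = 26959946667150639794667015087019630673637144422540572481103610249993
def pvF : Int := 26959946667150639794667015087019630673637144422540572481103610249993

-- reduce_poly: `while a.bit_length() > DEG: a ^= f << (a.bit_length() - (DEG+1))`.
-- Fuel only makes the loop total (each pass strips the top bit); `f << k` on the nonnegative
-- shift k is exactly `f * 2^k`.
def reducePoly : Nat → Int → Int
  | 0, a => a
  | fuel + 1, a =>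
    if PySem.Int.bitLength a > 224 then
      reducePoly fuel (PySem.Int.bxor a (pvF * 2 ^ (PySem.Int.bitLength a - 225)))
    else a

-- the while-loop of sqr: `while x: if x & 1: res |= 1 << (pos*2); x >>= 1; pos += 1`.
-- Fuel a.natAbs + 1 only makes it total (x halves each pass); `x >>= 1` is floordiv x 2,
-- `1 << (pos*2)` is 2^(pos*2), `res |= …` is PySem.Int.bor.
def sqrLoop : Nat → Int → Int → Nat → Int
  | 0, _, res, _ => res
  | fuel + 1, x, res, pos =>
    if x ≠ 0 then
      sqrLoop fuel (PySem.Int.floordiv x 2)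
        (if PySem.Int.band x 1 ≠ 0 then PySem.Int.bor res (2 ^ (pos * 2)) else res) (pos + 1)
    else res

def sqr (a : Int) : Int :=
  let res := sqrLoop (a.natAbs + 1) a 0 0
  reducePoly (PySem.Int.bitLength res) res

-- ===== PORT B =====

-- binary digits of n, most significant first: bin(n)[2:]  (bin(0)[2:] = "0")
def binDigitsPos : Nat → List Nat
  | 0 => []
  | n + 1 => binDigitsPos ((n + 1) / 2) ++ [(n + 1) % 2]
decreasing_by exact Nat.div_lt_self (Nat.succ_pos n) (by omega)

def binDigits (n : Nat) : List Nat := if n = 0 then [0] else binDigitsPos n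

-- int(bin(a)[2:], 4): fold the binary digit string as a base-4 numeral, then reduce_poly
def sqr_alt (a : Int) : Int :=
  let res : Int := ((binDigits a.toNat).foldl (fun acc d => 4 * acc + d) 0 : Nat)
  reducePoly (PySem.Int.bitLength res) res

-- ===== PRECONDITION & SPEC =====
-- excludes negative a: there A's while-loop never terminates (x >>= 1 never reaches zero) and B raises ValueError
def Pre_sqr (a : Int) : Prop := 0 ≤ a
instance (a : Int) : Decidable (Pre_sqr a) := by unfold Pre_sqr; infer_instance
def pvWitness_sqr : Int := 6

def Spec_sqr (a : Int) (out : Int) : Prop := out = sqr_alt a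
instance (a : Int) (out : Int) : Decidable (Spec_sqr a out) := by unfold Spec_sqr; infer_instance

-- ===== CLAIM (what is proved, stated in full; the proofs are below) =====
def Claim_equal_sqr : Prop := ∀ (a : Int), Dom_sqr a → Pre_sqr a → Spec_sqr a (sqr a)

-- ===== LEMMAS AND PROOFS =====

-- the spread value as a recurrence: g n = the bits of n with zeros interleaved
def spread : Nat → Nat
  | 0 => 0
  | n + 1 => 4 * spread ((n + 1) / 2) + (n + 1) % 2
decreasing_by exact Nat.div_lt_self (Nat.succ_pos n) (by omega)

theorem spread_succ (m : Nat) : spread (m + 1) = 4 * spread ((m + 1) / 2) + (m + 1) % 2 := by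
  rw [spread]

theorem lor_two_pow_of_lt : ∀ (k r : Nat), r < 2 ^ k → r ||| 2 ^ k = r + 2 ^ k := by
  intro k
  induction k with
  | zero =>
    intro r h
    have : r = 0 := by omega
    subst this; decide
  | succ k ih =>
    intro r h
    have hb : r = Nat.bit (r % 2 == 1) (r / 2) := by
      simp [Nat.bit]
      rcases Nat.mod_two_eq_zero_or_one r with h2 | h2 <;> simp [h2] <;> omega
    have hp : (2 : Nat) ^ (k + 1) = Nat.bit false (2 ^ k) := by simp [Nat.bit]; ring
    rw [hb, hp, Nat.lor_bit]
    have h2 : r / 2 < 2 ^ k := by omega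
    rw [ih _ h2]
    simp [Nat.bit]
    rcases Nat.mod_two_eq_zero_or_one r with h2 | h2 <;> simp [h2] <;> omega

-- A's loop computes r + spread n * 4^p (r holds only bits below position 2p)
theorem sqrLoop_eq : ∀ (fuel n r p : Nat), n < fuel → r < 4 ^ p →
    sqrLoop fuel (n : Int) (r : Int) p = ((r + spread n * 4 ^ p : Nat) : Int) := by
  intro fuel
  induction fuel with
  | zero => intro n r p h; omega
  | succ fuel ih =>
    intro n r p hn hr
    match n with
    | 0 => simp [sqrLoop, spread]
    | m + 1 =>
      rw [sqrLoop]
      have hx : ((m + 1 : Nat) : Int) ≠ 0 := by exact_mod_cast Nat.succ_ne_zero m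
      rw [if_pos hx]
      have hband : PySem.Int.band ((m + 1 : Nat) : Int) 1 = (((m + 1) % 2 : Nat) : Int) := by
        rw [show (1 : Int) = ((1 : Nat) : Int) from rfl, PySem.Int.band_natCast]
        simp [Nat.and_one_is_mod]
      have hdiv : PySem.Int.floordiv ((m + 1 : Nat) : Int) 2 = (((m + 1) / 2 : Nat) : Int) := by
        exact_mod_cast PySem.Int.floordiv_natCast (m + 1) 2
      rw [hband, hdiv]
      have hfuel : (m + 1) / 2 < fuel := by
        have := Nat.div_lt_self (Nat.succ_pos m) (show 1 < 2 by omega); omega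
      rcases Nat.mod_two_eq_zero_or_one (m + 1) with h2 | h2
      · rw [h2]
        rw [if_neg (by simp)]
        have hr' : r < 4 ^ (p + 1) := by
          have : (4 : Nat) ^ p ≤ 4 ^ (p + 1) := Nat.pow_le_pow_right (by omega) (by omega)
          omega
        rw [ih _ _ _ hfuel hr']
        rw [spread_succ m, h2]
        congr 1
        ring
      · rw [h2]
        rw [if_pos (by simp)]
        have hbor : PySem.Int.bor (r : Int) (2 ^ (p * 2)) = ((r + 4 ^ p : Nat) : Int) := by
          rw [show (2 : Int) ^ (p * 2) = ((2 ^ (p * 2) : Nat) : Int) by push_cast; ring,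
              PySem.Int.bor_natCast]
          have h4 : (4 : Nat) ^ p = 2 ^ (p * 2) := by
            rw [show (4 : Nat) = 2 ^ 2 from rfl, ← Nat.pow_mul, Nat.mul_comm]
          rw [lor_two_pow_of_lt (p * 2) r (h4 ▸ hr), h4]
        rw [hbor]
        have hr' : r + 4 ^ p < 4 ^ (p + 1) := by
          have : (4 : Nat) ^ (p + 1) = 4 * 4 ^ p := by ring
          omega
        rw [ih _ _ _ hfuel hr']
        rw [spread_succ m, h2]
        congr 1
        ring

-- B's base-4 fold over the binary digits computes the same recurrence
theorem foldl_binDigitsPos_eq : ∀ (n : Nat),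
    (binDigitsPos n).foldl (fun acc d => 4 * acc + d) 0 = spread n := by
  intro n
  induction n using Nat.strong_induction_on with
  | _ n ih =>
    match n with
    | 0 => simp [binDigitsPos, spread]
    | m + 1 =>
      rw [binDigitsPos, List.foldl_append]
      have hlt : (m + 1) / 2 < m + 1 := Nat.div_lt_self (Nat.succ_pos m) (by omega)
      rw [ih _ hlt, spread_succ]
      simp [List.foldl]

theorem foldl_binDigits_eq (n : Nat) :
    (binDigits n).foldl (fun acc d => 4 * acc + d) 0 = spread n := by
  by_cases h : n = 0
  · subst h; simp [binDigits, spread]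
  · rw [binDigits, if_neg h]; exact foldl_binDigitsPos_eq n

-- ===== VERDICT (by name: the statement is the Claim_ definition above) =====
theorem sqr_spec : Claim_equal_sqr := by
  intro a _ hpre
  unfold Spec_sqr sqr sqr_alt
  have ha : a = (a.toNat : Int) := (Int.toNat_of_nonneg hpre).symm
  have hnat : a.natAbs = a.toNat := by omega
  have hres : sqrLoop (a.natAbs + 1) a 0 0 =
      ((binDigits a.toNat).foldl (fun acc d => 4 * acc + d) 0 : Nat) := by
    rw [foldl_binDigits_eq, hnat]
    calc sqrLoop (a.toNat + 1) a 0 0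
        = sqrLoop (a.toNat + 1) ((a.toNat : Nat) : Int) ((0 : Nat) : Int) 0 := by
          rw [← ha]; rfl
      _ = ((0 + spread a.toNat * 4 ^ 0 : Nat) : Int) :=
          sqrLoop_eq _ _ _ _ (Nat.lt_succ_self _) (by omega)
      _ = ((spread a.toNat : Nat) : Int) := by norm_num
  simp only [hres]
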